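-- pv_equiv track=rewrite | github.com/OlegAtaman/labs | 1/main3.py | check
-- ===== SOURCE A (Python) =====
-- def check(string):
--     prev = ''
--     for c in string:
--         if not c.isdigit() and not prev.isdigit():
--             return False
--         elif c == '*' or c == '/':
--             return False
--         prev = c
--     return True
-- ===== SOURCE B (Python) =====
-- def check(string):
--     if any(c in '*/' for c in string):
--         return False
--     d = [c.isdigit() for c in string]
--     if d and not d[0]:
--         return False
--     if any(not a and not b for a, b in zip(d, d[1:])):
--         return False
--     return True
-- ===== Notes on version B (the rewrite author's own statement) =====
-- stated objective: alternative
-- what changed: Replaces the single accumulator-driven early-exit loop (prev sentinel) with a precomputed digit table followed by three independent scans: a forbidden-operator membership check, a first-char-digit check, and an adjacent-pair check on the table.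
import Mathlib
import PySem

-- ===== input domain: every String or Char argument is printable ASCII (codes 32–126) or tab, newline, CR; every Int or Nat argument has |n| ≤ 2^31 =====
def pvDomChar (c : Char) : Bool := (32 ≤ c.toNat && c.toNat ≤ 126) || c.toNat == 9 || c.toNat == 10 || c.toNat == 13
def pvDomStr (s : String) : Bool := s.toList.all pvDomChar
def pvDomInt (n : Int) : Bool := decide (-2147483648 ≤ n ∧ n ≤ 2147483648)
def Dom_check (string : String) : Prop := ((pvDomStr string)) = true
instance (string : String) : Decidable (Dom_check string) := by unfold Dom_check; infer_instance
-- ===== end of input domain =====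

-- B replaces A's single early-exit loop with a prev sentinel by a precomputed digit table
-- plus three independent scans (operator membership, first-char digit, adjacent pairs); alternative decomposition, same cost.

-- ===== PORT A =====
-- A's for-loop with the `prev` string accumulator (prev starts as '')
def checkLoop : List Char → String → Bool
  | [], _ => true
  | c :: rest, prev =>
    if !(PySem.Chars.isdigit c) && !(PySem.Str.strIsdigit prev) then false
    else if c = '*' ∨ c = '/' then false
    else checkLoop rest (String.ofList [c])

def check (string : String) : Bool := checkLoop string.toList ""

-- ===== PORT B =====
def check_alt (string : String) : Bool :=
  let cs := string.toList
  if cs.any (fun c => c = '*' || c = '/') then false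
  else
    let d := cs.map PySem.Chars.isdigit
    if (match d.head? with | some b => !b | none => false) then false
    else if (d.zip d.tail).any (fun p => !p.1 && !p.2) then false
    else true

-- ===== PRECONDITION & SPEC =====
def Spec_check (string : String) (out : Bool) : Prop := out = check_alt string
instance (string : String) (out : Bool) : Decidable (Spec_check string out) := by unfold Spec_check; infer_instance

-- ===== CLAIM (what is proved, stated in full; the proofs are below) =====
def Claim_equal_check : Prop := ∀ (string : String), Dom_check string → Spec_check string (check string)

-- ===== LEMMAS AND PROOFS =====

-- proof-only reformulation of A's loop threading just the digit-ness of prev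
def gLoop : List Char → Bool → Bool
  | [], _ => true
  | c :: rest, pd =>
    if !(PySem.Chars.isdigit c) && !pd then false
    else if c = '*' ∨ c = '/' then false
    else gLoop rest (PySem.Chars.isdigit c)

-- helper pieces of B's characterization
def noStar (cs : List Char) : Bool := !(cs.any (fun c => c = '*' || c = '/'))
def hd0 : List Char → Bool
  | [] => true
  | c :: _ => PySem.Chars.isdigit c
def pairsOk (d : List Bool) : Bool := !((d.zip d.tail).any (fun p => !p.1 && !p.2))

theorem checkLoop_eq_g (l : List Char) (prev : String) :
    checkLoop l prev = gLoop l (PySem.Str.strIsdigit prev) := by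
  induction l generalizing prev with
  | nil => rfl
  | cons c rest ih =>
    simp only [checkLoop, gLoop, ih]
    have h : PySem.Str.strIsdigit (String.ofList [c]) = PySem.Chars.isdigit c := by
      simp [PySem.Str.strIsdigit_eq, PySem.Chars.strIsdigit]
    rw [h]

theorem gLoop_eq (cs : List Char) (pd : Bool) :
    gLoop cs pd = (noStar cs && (pd || hd0 cs) && pairsOk (cs.map PySem.Chars.isdigit)) := by
  induction cs generalizing pd with
  | nil => simp [gLoop, noStar, hd0, pairsOk]
  | cons c rest ih =>
    simp only [gLoop]
    by_cases hdg : PySem.Chars.isdigit c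
    · -- c is a digit: neither early return can fire
      have h1 : ¬ (c = '*' ∨ c = '/') := by
        rintro (rfl | rfl) <;> simp [PySem.Chars.isdigit] at hdg
      push Not at h1
      cases rest with
      | nil => simp [gLoop, hdg, h1.1, h1.2, noStar, hd0, pairsOk]
      | cons c0 r =>
        simp [hdg, h1.1, h1.2, ih, noStar, hd0, pairsOk]
    · -- c is not a digit
      cases pd with
      | false => simp [hdg, noStar, hd0]
      | true =>
        by_cases hstar : c = '*' ∨ c = '/'
        · rcases hstar with rfl | rfl <;> simp [noStar]
        · push Not at hstar
          cases rest with
          | nil => simp [gLoop, hdg, hstar.1, hstar.2, noStar, hd0, pairsOk]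
          | cons c0 r => simp [hdg, hstar.1, hstar.2, ih, noStar, hd0, pairsOk, Bool.and_assoc]

theorem any_ff (L : List (Bool × Bool)) :
    (L.any fun p => !p.1 && !p.2) = decide ((false, false) ∈ L) := by
  induction L with
  | nil => simp
  | cons p t ih => cases p with | mk a b => cases a <;> cases b <;> simp [ih]

theorem check_alt_eq (string : String) :
    check_alt string = (noStar string.toList && (false || hd0 string.toList)
      && pairsOk (string.toList.map PySem.Chars.isdigit)) := by
  cases h : string.toList with
  | nil => simp [check_alt, h, noStar, hd0, pairsOk]
  | cons c rest =>
    simp only [check_alt, h, List.map_cons, List.head?]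
    by_cases hstar : (c :: rest).any (fun c => c = '*' || c = '/')
    · simp [hstar, noStar]
    · simp [hstar, noStar, hd0, pairsOk, any_ff]

-- ===== VERDICT (by name: the statement is the Claim_ definition above) =====
theorem check_spec : Claim_equal_check := by
  intro string _
  unfold Spec_check check
  rw [checkLoop_eq_g, gLoop_eq, check_alt_eq]
  simp [PySem.Str.strIsdigit_eq, PySem.Chars.strIsdigit]
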